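-- pv_equiv track=rewrite | github.com/triton-MX/Data-exercises | OrdenamientoParentesis.py | contar_movimientos
-- ===== SOURCE A (Python) =====
-- def contar_movimientos(s):
--
--     # Verificar si el número total de paréntesis es impar
--     if len(s) % 2 !=0:
--         return -1
--
--     # Verificar si hay igual parentesis de apertura y de cierre
--     n_apertura = s.count('(')
--     n_cierre = s.count(')')
--     if n_apertura != n_cierre:
--         return -1
--
--     apertura_no_balanceada = 0
--     cierre_no_balanceada = 0
--
--     for char in s:
--         if char == '(':
--             apertura_no_balanceada += 1
--         elif char == ')':
--             if apertura_no_balanceada > 0: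
--                 apertura_no_balanceada -= 1
--             """
--             else:
--                 cierre_no_balanceada += 1"""
--
--     # El número total de movimientos necesarios es la suma de los paréntesis no balanceados
--     movimientos = apertura_no_balanceada + cierre_no_balanceada
--     return movimientos
-- ===== SOURCE B (Python) =====
-- def contar_movimientos(s):
--     # Same guards as the original: odd total length, unequal '(' / ')' counts.
--     if len(s) % 2 != 0:
--         return -1
--     if s.count('(') != s.count(')'):
--         return -1
--     # Min-prefix-balance scan instead of greedy matching: since the counts are
--     # equal, the unmatched-open count equals minus the minimum running balance.
--     bal = 0
--     min_bal = 0
--     for char in s: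
--         if char == '(':
--             bal += 1
--         elif char == ')':
--             bal -= 1
--             if bal < min_bal:
--                 min_bal = bal
--     return -min_bal
-- ===== Notes on version B (the rewrite author's own statement) =====
-- stated objective: alternative
-- what changed: Replaces the greedy decrement-when-positive matching loop (counter of currently unmatched opens) by a running-balance scan that tracks the minimum prefix balance and returns its negation; guards are unchanged.
import Mathlib
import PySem

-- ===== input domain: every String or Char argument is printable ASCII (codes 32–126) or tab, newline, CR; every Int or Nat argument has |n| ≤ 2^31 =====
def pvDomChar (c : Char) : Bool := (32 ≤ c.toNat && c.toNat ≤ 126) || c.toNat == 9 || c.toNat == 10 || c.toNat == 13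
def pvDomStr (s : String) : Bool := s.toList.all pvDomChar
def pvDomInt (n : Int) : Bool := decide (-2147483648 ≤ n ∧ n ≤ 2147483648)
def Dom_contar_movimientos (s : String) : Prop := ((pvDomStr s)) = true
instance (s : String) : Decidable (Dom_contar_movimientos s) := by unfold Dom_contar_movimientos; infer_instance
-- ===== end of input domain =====

-- B replaces A's greedy unmatched-open counter by a min-prefix-balance scan (same guards, same O(n) cost).


-- ===== PORT A =====
-- the loop body of A: '(' increments, ')' decrements only when positive
def pvStepA (a : Int) (c : Char) : Int :=
  if c = '(' then a + 1
  else if c = ')' then (if a > 0 then a - 1 else a)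
  else a

def contar_movimientos (s : String) : Int :=
  if PySem.Int.mod (PySem.Str.len s) 2 ≠ 0 then -1
  else
    let n_apertura : Int := PySem.Str.count s "("
    let n_cierre : Int := PySem.Str.count s ")"
    if n_apertura ≠ n_cierre then -1
    else
      let apertura_no_balanceada := s.toList.foldl pvStepA 0
      let cierre_no_balanceada : Int := 0
      apertura_no_balanceada + cierre_no_balanceada

-- ===== PORT B =====
-- the loop body of B: running balance and its minimum
def pvStepB (p : Int × Int) (c : Char) : Int × Int :=
  if c = '(' then (p.1 + 1, p.2)
  else if c = ')' then
    let b := p.1 - 1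
    (b, if b < p.2 then b else p.2)
  else p

def contar_movimientos_alt (s : String) : Int :=
  if PySem.Int.mod (PySem.Str.len s) 2 ≠ 0 then -1
  else if (PySem.Str.count s "(" : Int) ≠ PySem.Str.count s ")" then -1
  else
    let r := s.toList.foldl pvStepB (0, 0);
    -r.2

-- ===== PRECONDITION & SPEC =====
def Spec_contar_movimientos (s : String) (out : Int) : Prop := out = contar_movimientos_alt s
instance (s : String) (out : Int) : Decidable (Spec_contar_movimientos s out) := by unfold Spec_contar_movimientos; infer_instance

-- ===== CLAIM (what is proved, stated in full; the proofs are below) =====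
def Claim_equal_contar_movimientos : Prop := ∀ (s : String), Dom_contar_movimientos s → Spec_contar_movimientos s (contar_movimientos s)

-- ===== LEMMAS AND PROOFS =====

-- Python str.count with a single-char needle is List.count
lemma count_go_singleton (c : Char) (l : List Char) (fuel acc : Nat) (h : l.length ≤ fuel) :
    PySem.Chars.count.go [c] fuel l acc = acc + l.count c := by
  induction l generalizing fuel acc with
  | nil => cases fuel <;> simp [PySem.Chars.count.go]
  | cons x t ih =>
    obtain ⟨f, rfl⟩ : ∃ f, fuel = f + 1 := ⟨fuel - 1, by simp at h; omega⟩
    by_cases hx : c = x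
    · subst hx
      simp only [PySem.Chars.count.go, List.isPrefixOf, beq_self_eq_true, Bool.true_and,
        List.isPrefixOf_nil_left, if_true, List.length_singleton, List.drop_one, List.tail_cons]
      rw [ih f (acc + 1) (by simpa using h)]
      simp [List.count_cons]
      omega
    · have : [c].isPrefixOf (x :: t) = false := by
        simp [List.isPrefixOf]; exact fun hcx => absurd hcx hx
      simp only [PySem.Chars.count.go, this, if_false]
      rw [ih f acc (by simpa using h)]
      simp [List.count_cons, hx]
      intro hxc; exact absurd hxc.symm hx

lemma count_singleton (c : Char) (l : List Char) :
    PySem.Chars.count l [c] = l.count c := by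
  simpa using count_go_singleton c l l.length 0 (le_refl _)

-- the first component of B's fold is the running balance
lemma foldB_fst (l : List Char) (bal mn : Int) :
    (l.foldl pvStepB (bal, mn)).1 = bal + (l.count '(' : Int) - (l.count ')' : Int) := by
  induction l generalizing bal mn with
  | nil => simp
  | cons c t ih =>
    by_cases h1 : c = '('
    · subst h1
      simp only [List.foldl_cons, pvStepB, if_true]
      rw [ih]
      simp [List.count_cons]
      push_cast
      ring
    · by_cases h2 : c = ')'
      · subst h2
        simp only [List.foldl_cons, pvStepB, if_neg (by decide : ¬ (')' = '('))]
        rw [ih]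
        simp [List.count_cons, h1]
        push_cast
        ring
      · simp only [List.foldl_cons, pvStepB, if_neg h1, if_neg h2]
        rw [ih]
        simp [List.count_cons, h1, h2]

-- loop invariant: A's counter equals balance minus min-balance
lemma fold_inv (l : List Char) (a bal mn : Int) (h1 : mn ≤ 0) (h2 : mn ≤ bal)
    (h3 : a = bal - mn) :
    l.foldl pvStepA a = (l.foldl pvStepB (bal, mn)).1 - (l.foldl pvStepB (bal, mn)).2 := by
  induction l generalizing a bal mn with
  | nil => simpa using h3
  | cons c t ih =>
    by_cases hc1 : c = '('
    · subst hc1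
      simp only [List.foldl_cons, pvStepA, pvStepB, if_true]
      exact ih (a + 1) (bal + 1) mn h1 (by omega) (by omega)
    · by_cases hc2 : c = ')'
      · subst hc2
        simp only [List.foldl_cons, pvStepA, pvStepB,
          if_neg (by decide : ¬ (')' = '('))]
        by_cases ha : a > 0
        · have hlt : ¬ (bal - 1 < mn) := by omega
          simp only [if_pos ha, hlt, if_false]
          exact ih (a - 1) (bal - 1) mn h1 (by omega) (by omega)
        · have ha0 : a = 0 := by omega
          have heq : bal = mn := by omega
          have hlt : bal - 1 < mn := by omega
          simp only [if_neg ha, hlt, if_true]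
          exact ih a (bal - 1) (bal - 1) (by omega) (by omega) (by omega)
      · simp only [List.foldl_cons, pvStepA, pvStepB, if_neg hc1, if_neg hc2]
        exact ih a bal mn h1 h2 h3

-- ===== VERDICT (by name: the statement is the Claim_ definition above) =====
theorem contar_movimientos_spec : Claim_equal_contar_movimientos := by
  intro s _
  unfold Spec_contar_movimientos contar_movimientos contar_movimientos_alt
  dsimp only
  split_ifs with h1 h2
  · rfl
  · rfl
  · push_neg at h2
    have hc : (s.toList.count '(' : Int) = (s.toList.count ')' : Int) := by
      rw [PySem.Str.count_eq, PySem.Str.count_eq] at h2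
      have e1 : ("(" : String).toList = ['('] := by decide
      have e2 : (")" : String).toList = [')'] := by decide
      rw [e1, count_singleton, e2, count_singleton] at h2
      exact_mod_cast h2
    have hfst : (s.toList.foldl pvStepB (0, 0)).1 = 0 := by
      rw [foldB_fst]; omega
    have hinv := fold_inv s.toList 0 0 0 le_rfl le_rfl (by ring)
    rw [add_zero, hinv, hfst]
    ring
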